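-- pv_equiv track=rewrite | github.com/NuryeNigusMekonen/BrownfieldCartographer | src/analyzers/sql_lineage.py | _expand_cte_references
-- ===== SOURCE A (Python) =====
-- def _expand_cte_references(refs: set[str], cte_graph: dict[str, set[str]]) -> set[str]:
--     expanded: set[str] = set()
--
--     def walk(name: str, stack: set[str]) -> set[str]:
--         lowered = name.lower()
--         if lowered not in cte_graph:
--             return {name}
--         if lowered in stack:
--             return set()
--         leaves: set[str] = set()
--         for dep in cte_graph[lowered]:
--             leaves.update(walk(dep, stack | {lowered}))
--         return leaves
--
--     for ref in refs:
--         expanded.update(walk(ref, set()))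
--     return expanded
-- ===== SOURCE B (Python) =====
-- def _expand_cte_references(refs: set[str], cte_graph: dict[str, set[str]]) -> set[str]:
--     expanded: set[str] = set()
--     visited: set[str] = set()
--
--     def visit(name: str) -> None:
--         lowered = name.lower()
--         if lowered not in cte_graph:
--             expanded.add(name)
--         elif lowered not in visited:
--             visited.add(lowered)
--             for dep in cte_graph[lowered]:
--                 visit(dep)
--
--     for ref in refs:
--         visit(ref)
--     return expanded
-- ===== Notes on version B (the rewrite author's own statement) =====
-- stated objective: faster
-- what changed: A re-walks shared CTE subgraphs from scratch on every reference (per-path recursion returning fresh sets, cut only by the current path stack, exponential on shared/diamond graphs); B does one depth-first traversal with a global visited set shared across all references, visiting each CTE at most once and adding leaf names to a single accumulator.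
import Mathlib
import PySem

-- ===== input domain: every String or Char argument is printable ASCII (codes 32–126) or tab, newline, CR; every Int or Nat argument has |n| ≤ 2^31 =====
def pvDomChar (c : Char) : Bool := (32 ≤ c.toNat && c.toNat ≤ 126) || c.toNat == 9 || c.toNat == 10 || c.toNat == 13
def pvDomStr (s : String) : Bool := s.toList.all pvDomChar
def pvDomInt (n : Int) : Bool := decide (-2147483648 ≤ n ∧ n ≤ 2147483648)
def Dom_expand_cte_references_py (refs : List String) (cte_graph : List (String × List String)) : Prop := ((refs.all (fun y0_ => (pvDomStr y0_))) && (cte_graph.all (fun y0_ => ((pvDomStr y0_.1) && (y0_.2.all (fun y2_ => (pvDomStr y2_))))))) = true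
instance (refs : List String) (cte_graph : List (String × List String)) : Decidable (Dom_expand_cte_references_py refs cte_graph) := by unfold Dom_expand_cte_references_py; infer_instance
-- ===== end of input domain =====

-- B replaces A's per-path recursive re-exploration (fresh set per call, cut only by the
-- current path stack) by a single depth-first traversal with one global visited set,
-- so each CTE is expanded at most once.

-- ===== PORT A =====
-- Measure for A's recursion: number of graph keys not yet on the path stack.
def pvKeysFree (g : List (String × List String)) (s : List String) : Nat :=
  ((g.map Prod.fst).filter (fun k => decide (k ∉ s))).length

-- termination helpers for the ports (cited in decreasing_by)
theorem pv_get?_mem_keys (g : List (String × List String)) (k : String) (v : List String)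
    (h : (PySem.Dict.mk g).get? k = some v) : k ∈ g.map Prod.fst := by
  induction g with
  | nil => simp [PySem.Dict.get?] at h
  | cons p rest ih =>
    rw [show (PySem.Dict.mk (p :: rest)) = PySem.Dict.mk ((p.1, p.2) :: rest) from rfl,
      PySem.Dict.get?_mk_cons] at h
    by_cases hk : (p.1 == k) = true
    · exact List.mem_map.mpr ⟨p, List.mem_cons_self .., eq_of_beq hk⟩
    · rw [if_neg hk] at h
      rw [List.map_cons]
      exact List.mem_cons_of_mem _ (ih h)

theorem pv_filter_append_lt (l : List String) (s : List String) (low : String)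
    (hmem : low ∈ l) (hns : low ∉ s) :
    ((l.filter (fun k => decide (k ∉ s ++ [low]))).length <
      (l.filter (fun k => decide (k ∉ s))).length) := by
  have hsub : List.Sublist (l.filter (fun k => decide (k ∉ s ++ [low])))
      (l.filter (fun k => decide (k ∉ s))) := by
    refine List.monotone_filter_right l ?_
    intro x hx
    simp only [decide_eq_true_eq] at hx ⊢
    intro hxs; exact hx (by simp [hxs])
  have hmemf : low ∈ l.filter (fun k => decide (k ∉ s)) :=
    List.mem_filter.mpr ⟨hmem, by simp [hns]⟩
  have hnot : low ∉ l.filter (fun k => decide (k ∉ s ++ [low])) := by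
    intro hc
    have := (List.mem_filter.mp hc).2
    simp at this
  refine Nat.lt_of_le_of_ne hsub.length_le ?_
  intro heq
  exact hnot (hsub.eq_of_length heq ▸ hmemf)

theorem pvKeysFree_add_lt (g : List (String × List String)) (s : List String)
    (low : String) (deps : List String)
    (h : (PySem.Dict.mk g).get? low = some deps) (hns : low ∉ s) :
    pvKeysFree g (PySem.Set.add s low) < pvKeysFree g s := by
  rw [PySem.Set.add_of_not_mem hns]
  exact pv_filter_append_lt _ s low (pv_get?_mem_keys g low deps h) hns

-- Port of A: walk(name, stack) with the per-call leaf set; walkListA is the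
-- 'for dep in cte_graph[lowered]' loop accumulating leaves.update(walk(dep, stack | {lowered})).
mutual
def walkA (g : List (String × List String)) (name : String) (stack : List String) :
    List String :=
  match h : (PySem.Dict.mk g).get? (PySem.Str.lower name) with
  | none => [name]                       -- lowered not in cte_graph: return {name}
  | some deps =>
    if hs : PySem.Str.lower name ∈ stack then []    -- lowered in stack: return set()
    else walkListA g deps (PySem.Set.add stack (PySem.Str.lower name)) []
termination_by (pvKeysFree g stack, 0, 0)
decreasing_by
  exact Prod.Lex.left _ _ (pvKeysFree_add_lt g stack _ deps h hs)
def walkListA (g : List (String × List String)) (deps : List String)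
    (stack : List String) (leaves : List String) : List String :=
  match deps with
  | [] => leaves
  | d :: ds => walkListA g ds stack (PySem.Set.update leaves (walkA g d stack))
termination_by (pvKeysFree g stack, 1, deps.length)
decreasing_by
  · exact Prod.Lex.right _ (Prod.Lex.left _ _ (by omega))
  · exact Prod.Lex.right _ (Prod.Lex.right _ (by simp [List.length_cons]))
end

def expand_cte_references_py (refs : List String) (cte_graph : List (String × List String)) :
    List String :=
  refs.foldl (fun expanded ref => PySem.Set.update expanded (walkA cte_graph ref [])) []

-- ===== PORT B =====
-- Port of B: one DFS with a global visited set and a single 'expanded' accumulator.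
-- The Nat argument is a fuel guard making the threaded recursion total; the entry point
-- passes cte_graph.length + 1, which the proofs show is never exhausted.
mutual
def visitB (g : List (String × List String)) :
    Nat → String → List String → List String → List String × List String
  | 0, _, visited, out => (visited, out)          -- fuel guard (never reached from the entry)
  | fuel + 1, name, visited, out =>
    match (PySem.Dict.mk g).get? (PySem.Str.lower name) with
    | none => (visited, PySem.Set.add out name)   -- leaf: expanded.add(name)
    | some deps =>
      if PySem.Str.lower name ∈ visited then (visited, out)
      else visitListB g fuel deps (PySem.Set.add visited (PySem.Str.lower name)) out
termination_by fuel _ _ _ => (fuel, 0)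
decreasing_by
  exact Prod.Lex.left _ _ (by omega)
def visitListB (g : List (String × List String)) :
    Nat → List String → List String → List String → List String × List String
  | _, [], visited, out => (visited, out)
  | fuel, d :: ds, visited, out =>
    let p := visitB g fuel d visited out
    visitListB g fuel ds p.1 p.2
termination_by fuel deps _ _ => (fuel, deps.length + 1)
decreasing_by
  · exact Prod.Lex.right _ (by omega)
  · exact Prod.Lex.right _ (by simp [List.length_cons])
end

def expand_cte_references_py_alt (refs : List String)
    (cte_graph : List (String × List String)) : List String :=
  (refs.foldl (fun st ref => visitB cte_graph (cte_graph.length + 1) ref st.1 st.2)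
    (([] : List String), ([] : List String))).2

-- ===== PRECONDITION & SPEC =====
def Spec_expand_cte_references_py (refs : List String) (cte_graph : List (String × List String)) (out : List String) : Prop := out = expand_cte_references_py_alt refs cte_graph
instance (refs : List String) (cte_graph : List (String × List String)) (out : List String) : Decidable (Spec_expand_cte_references_py refs cte_graph out) := by unfold Spec_expand_cte_references_py; infer_instance

-- ===== CLAIM (what is proved, stated in full; the proofs are below) =====
def Claim_equal_expand_cte_references_py : Prop := ∀ (refs : List String) (cte_graph : List (String × List String)), Dom_expand_cte_references_py refs cte_graph → Spec_expand_cte_references_py refs cte_graph (expand_cte_references_py refs cte_graph)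

-- ===== LEMMAS AND PROOFS =====

theorem pvKeysFree_anti (g : List (String × List String)) (s t : List String)
    (h : ∀ x ∈ s, x ∈ t) : pvKeysFree g t ≤ pvKeysFree g s := by
  refine (List.monotone_filter_right _ ?_).length_le
  intro x hx
  simp only [decide_eq_true_eq] at hx ⊢
  intro hxs; exact hx (h x hxs)

theorem pvKeysFree_le_length (g : List (String × List String)) (s : List String) :
    pvKeysFree g s ≤ g.length := by
  calc pvKeysFree g s ≤ (g.map Prod.fst).length := List.length_filter_le _ _
    _ = g.length := List.length_map ..

theorem update_add (o a : List String) (x : String) :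
    PySem.Set.update o (PySem.Set.add a x) = PySem.Set.add (PySem.Set.update o a) x := by
  by_cases hx : x ∈ a
  · rw [PySem.Set.add_of_mem hx, PySem.Set.add_of_mem ((PySem.Set.mem_update o a x).mpr (Or.inr hx))]
  · rw [PySem.Set.add_of_not_mem hx]
    show (a ++ [x]).foldl PySem.Set.add o = PySem.Set.add (PySem.Set.update o a) x
    rw [List.foldl_append]
    rfl

theorem update_update (o a w : List String) :
    PySem.Set.update o (PySem.Set.update a w) = PySem.Set.update (PySem.Set.update o a) w := by
  induction w generalizing a with
  | nil => rfl
  | cons x w ih =>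
    calc PySem.Set.update o (PySem.Set.update (PySem.Set.add a x) w)
        = PySem.Set.update (PySem.Set.update o (PySem.Set.add a x)) w := ih _
      _ = PySem.Set.update (PySem.Set.add (PySem.Set.update o a) x) w := by rw [update_add]
      _ = PySem.Set.update (PySem.Set.update o a) (x :: w) := rfl

theorem update_of_subset (o w : List String) (h : ∀ x ∈ w, x ∈ o) :
    PySem.Set.update o w = o := by
  induction w with
  | nil => rfl
  | cons x w ih =>
    show PySem.Set.update (PySem.Set.add o x) w = o
    rw [PySem.Set.add_of_mem (h x (by simp))]
    exact ih (fun y hy => h y (by simp [hy]))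

-- equation shapes of walkA
theorem walkA_leaf (g : List (String × List String)) (n : String) (S : List String)
    (h : (PySem.Dict.mk g).get? (PySem.Str.lower n) = none) : walkA g n S = [n] := by
  rw [walkA, h]

theorem walkA_stack (g : List (String × List String)) (n : String) (S : List String)
    (deps : List String) (h : (PySem.Dict.mk g).get? (PySem.Str.lower n) = some deps)
    (hs : PySem.Str.lower n ∈ S) : walkA g n S = [] := by
  rw [walkA, h]
  simp [hs]

theorem walkA_go (g : List (String × List String)) (n : String) (S : List String)
    (deps : List String) (h : (PySem.Dict.mk g).get? (PySem.Str.lower n) = some deps)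
    (hs : PySem.Str.lower n ∉ S) :
    walkA g n S = walkListA g deps (PySem.Set.add S (PySem.Str.lower n)) [] := by
  rw [walkA, h]
  simp [hs]

theorem walkListA_acc (g : List (String × List String)) (deps : List String)
    (S : List String) : ∀ acc, walkListA g deps S acc = PySem.Set.update acc (walkListA g deps S []) := by
  induction deps with
  | nil =>
    intro acc
    rw [walkListA, show walkListA g ([] : List String) S [] = [] from by rw [walkListA]]
    rfl
  | cons d ds ih =>
    intro acc
    rw [walkListA, ih (PySem.Set.update acc (walkA g d S)),
      show walkListA g (d :: ds) S [] = walkListA g ds S (PySem.Set.update [] (walkA g d S)) from by rw [walkListA],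
      ih (PySem.Set.update [] (walkA g d S)), update_update, update_update]
    rfl

theorem mem_walkListA (g : List (String × List String)) (deps : List String)
    (S acc : List String) (x : String) :
    x ∈ walkListA g deps S acc ↔ x ∈ acc ∨ ∃ d ∈ deps, x ∈ walkA g d S := by
  induction deps generalizing acc with
  | nil => rw [walkListA]; simp
  | cons d ds ih =>
    rw [walkListA, ih]
    rw [PySem.Set.mem_update acc (walkA g d S) x]
    constructor
    · rintro ((h | h) | ⟨d', hd', h⟩)
      · exact Or.inl h
      · exact Or.inr ⟨d, by simp, h⟩
      · exact Or.inr ⟨d', by simp [hd'], h⟩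
    · rintro (h | ⟨d', hd', h⟩)
      · exact Or.inl (Or.inl h)
      · rcases List.mem_cons.mp hd' with rfl | hd'
        · exact Or.inl (Or.inr h)
        · exact Or.inr ⟨d', hd', h⟩

-- leaves reachable from a name along cte edges avoiding S, with derivation depth k
def RKd (g : List (String × List String)) : Nat → String → List String → String → Prop
  | 0, _, _, _ => False
  | k + 1, n, S, x =>
    ((PySem.Dict.mk g).get? (PySem.Str.lower n) = none ∧ x = n)
    ∨ ∃ deps, (PySem.Dict.mk g).get? (PySem.Str.lower n) = some deps ∧
        PySem.Str.lower n ∉ S ∧ ∃ d ∈ deps, RKd g k d S x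

theorem RKd_congr (g : List (String × List String)) :
    ∀ (k : Nat) (n : String) (S S' : List String) (x : String),
      (∀ y, y ∈ S ↔ y ∈ S') → RKd g k n S x → RKd g k n S' x := by
  intro k
  induction k with
  | zero => intro n S S' x _ h; exact absurd h (by simp [RKd])
  | succ k ih =>
    intro n S S' x hiff h
    rcases h with ⟨hn, rfl⟩ | ⟨deps, hg, hns, d, hd, hR⟩
    · exact Or.inl ⟨hn, rfl⟩
    · exact Or.inr ⟨deps, hg, fun hc => hns ((hiff _).mpr hc), d, hd, ih d S S' x hiff hR⟩

theorem RKd_anti (g : List (String × List String)) :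
    ∀ (k : Nat) (n : String) (S S' : List String) (x : String),
      (∀ y, y ∈ S → y ∈ S') → RKd g k n S' x → RKd g k n S x := by
  intro k
  induction k with
  | zero => intro n S S' x _ h; exact absurd h (by simp [RKd])
  | succ k ih =>
    intro n S S' x hsub h
    rcases h with ⟨hn, rfl⟩ | ⟨deps, hg, hns, d, hd, hR⟩
    · exact Or.inl ⟨hn, rfl⟩
    · exact Or.inr ⟨deps, hg, fun hc => hns (hsub _ hc), d, hd, ih d S S' x hsub hR⟩

theorem RKd_split (g : List (String × List String)) (m : String) :
    ∀ (k : Nat) (S : List String) (d x : String), RKd g k d S x →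
      RKd g k d (PySem.Set.add S m) x ∨
      ∃ deps', (PySem.Dict.mk g).get? m = some deps' ∧ m ∉ S ∧
        ∃ j, j < k ∧ ∃ d' ∈ deps', RKd g j d' S x := by
  intro k
  induction k with
  | zero => intro S d x h; exact absurd h (by simp [RKd])
  | succ k ih =>
    intro S d x h
    rcases h with ⟨hn, rfl⟩ | ⟨deps, hg, hns, d2, hd2, hR⟩
    · exact Or.inl (Or.inl ⟨hn, rfl⟩)
    · by_cases hm : PySem.Str.lower d = m
      · exact Or.inr ⟨deps, hm ▸ hg, hm ▸ hns, k, Nat.lt_succ_self k, d2, hd2, hR⟩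
      · rcases ih S d2 x hR with hL | ⟨deps2, hg2, hns2, j, hj, d3, hd3, hR3⟩
        · refine Or.inl (Or.inr ⟨deps, hg, ?_, d2, hd2, hL⟩)
          intro hc
          rcases (PySem.Set.mem_add S m _).mp hc with h | h
          · exact hns h
          · exact hm h
        · exact Or.inr ⟨deps2, hg2, hns2, j, Nat.lt_succ_of_lt hj, d3, hd3, hR3⟩

theorem walkA_sub_RKd (g : List (String × List String)) :
    ∀ (F : Nat) (S : List String) (n x : String), pvKeysFree g S ≤ F →
      x ∈ walkA g n S → ∃ k, RKd g k n S x := by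
  intro F
  induction F using Nat.strong_induction_on with
  | _ F ihF =>
  intro S n x hF hx
  cases hg : (PySem.Dict.mk g).get? (PySem.Str.lower n) with
  | none =>
    rw [walkA_leaf g n S hg] at hx
    simp at hx
    exact ⟨1, Or.inl ⟨hg, hx⟩⟩
  | some deps =>
    by_cases hs : PySem.Str.lower n ∈ S
    · rw [walkA_stack g n S deps hg hs] at hx
      simp at hx
    · rw [walkA_go g n S deps hg hs] at hx
      rcases (mem_walkListA g deps _ [] x).mp hx with h0 | ⟨d, hd, hxd⟩
      · simp at h0
      · have hlt : pvKeysFree g (PySem.Set.add S (PySem.Str.lower n)) < F :=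
          lt_of_lt_of_le (pvKeysFree_add_lt g S _ deps hg hs) hF
        obtain ⟨k, hk⟩ := ihF _ hlt (PySem.Set.add S (PySem.Str.lower n)) d x le_rfl hxd
        have hk2 : RKd g k d S x :=
          RKd_anti g k d S (PySem.Set.add S (PySem.Str.lower n)) x
            (fun y hy => (PySem.Set.mem_add S _ y).mpr (Or.inl hy)) hk
        exact ⟨k + 1, Or.inr ⟨deps, hg, hs, d, hd, hk2⟩⟩

theorem RKd_to_walkA (g : List (String × List String)) :
    ∀ (F : Nat), ∀ (k : Nat) (S : List String) (n x : String), pvKeysFree g S ≤ F →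
      RKd g k n S x → x ∈ walkA g n S := by
  intro F
  induction F using Nat.strong_induction_on with
  | _ F ihF =>
  intro k
  induction k using Nat.strong_induction_on with
  | _ k ihK =>
  intro S n x hF hR
  cases k with
  | zero => exact absurd hR (by simp [RKd])
  | succ k2 =>
  rcases hR with ⟨hn, hxeq⟩ | ⟨deps, hg, hns, d, hd, hRd⟩
  · subst hxeq; rw [walkA_leaf g _ S hn]; simp
  · rcases RKd_split g (PySem.Str.lower n) k2 S d x hRd with hL
      | ⟨deps2, hg2, _, j, hj, d2, hd2, hR2⟩
    · rw [walkA_go g n S deps hg hns]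
      refine (mem_walkListA g deps _ [] x).mpr (Or.inr ⟨d, hd, ?_⟩)
      exact ihF _ (lt_of_lt_of_le (pvKeysFree_add_lt g S _ deps hg hns) hF) k2
        (PySem.Set.add S (PySem.Str.lower n)) d x le_rfl hL
    · have hde : deps2 = deps := by rw [hg] at hg2; exact (Option.some.inj hg2).symm
      subst hde
      have hstep : RKd g (j + 1) n S x := Or.inr ⟨deps2, hg, hns, d2, hd2, hR2⟩
      exact ihK (j + 1) (by omega) S n x hF hstep

theorem RKd_into_key (g : List (String × List String)) :
    ∀ (j : Nat) (S : List String) (low : String) (deps : List String) (d x : String),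
      (PySem.Dict.mk g).get? low = some deps → low ∉ S → d ∈ deps →
      RKd g j d S x → x ∈ walkListA g deps (PySem.Set.add S low) [] := by
  intro j
  induction j using Nat.strong_induction_on with
  | _ j ihJ =>
  intro S low deps d x hgl hls hd hR
  cases j with
  | zero => exact absurd hR (by simp [RKd])
  | succ j2 =>
  rcases RKd_split g low (j2 + 1) S d x hR with hL | ⟨deps2, hg2, _, j3, hj3, d3, hd3, hR3⟩
  · have hx := RKd_to_walkA g (pvKeysFree g (PySem.Set.add S low)) (j2 + 1)
      (PySem.Set.add S low) d x le_rfl hL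
    exact (mem_walkListA g deps _ [] x).mpr (Or.inr ⟨d, hd, hx⟩)
  · have hde : deps2 = deps := by rw [hgl] at hg2; exact (Option.some.inj hg2).symm
    subst hde
    exact ihJ j3 hj3 S low deps2 d3 x hgl hls hd3 hR3

theorem walkKey_anti (g : List (String × List String)) (S S' : List String)
    (u : String) (deps : List String) (x : String) (h : ∀ y ∈ S, y ∈ S')
    (hx : x ∈ walkListA g deps (PySem.Set.add S' u) []) :
    x ∈ walkListA g deps (PySem.Set.add S u) [] := by
  rcases (mem_walkListA g deps _ [] x).mp hx with h0 | ⟨d, hd, hxd⟩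
  · simp at h0
  · obtain ⟨k, hk⟩ := walkA_sub_RKd g (pvKeysFree g (PySem.Set.add S' u))
      (PySem.Set.add S' u) d x le_rfl hxd
    have hk2 : RKd g k d (PySem.Set.add S u) x := by
      refine RKd_anti g k d _ _ x ?_ hk
      intro y hy
      rcases (PySem.Set.mem_add S u y).mp hy with hy2 | hy2
      · exact (PySem.Set.mem_add S' u y).mpr (Or.inl (h y hy2))
      · exact (PySem.Set.mem_add S' u y).mpr (Or.inr hy2)
    have hx2 := RKd_to_walkA g (pvKeysFree g (PySem.Set.add S u)) k
      (PySem.Set.add S u) d x le_rfl hk2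
    exact (mem_walkListA g deps _ [] x).mpr (Or.inr ⟨d, hd, hx2⟩)

theorem walkKey_split (g : List (String × List String)) (S : List String)
    (u low : String) (depsU depsL : List String) (x : String)
    (hu : u ∉ S) (hl : low ∉ S) (hne : u ≠ low)
    (hgu : (PySem.Dict.mk g).get? u = some depsU)
    (hgl : (PySem.Dict.mk g).get? low = some depsL)
    (hx : x ∈ walkListA g depsU (PySem.Set.add S u) []) :
    x ∈ walkListA g depsU (PySem.Set.add (PySem.Set.add S low) u) [] ∨
      x ∈ walkListA g depsL (PySem.Set.add S low) [] := by
  rcases (mem_walkListA g depsU _ [] x).mp hx with h0 | ⟨d, hd, hxd⟩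
  · simp at h0
  · obtain ⟨k, hk⟩ := walkA_sub_RKd g (pvKeysFree g (PySem.Set.add S u))
      (PySem.Set.add S u) d x le_rfl hxd
    rcases RKd_split g low k (PySem.Set.add S u) d x hk with hL
      | ⟨deps2, hg2, _, j, _, d2, hd2, hR2⟩
    · left
      have hiff : ∀ y, y ∈ PySem.Set.add (PySem.Set.add S u) low ↔
          y ∈ PySem.Set.add (PySem.Set.add S low) u := by
        intro y
        simp only [PySem.Set.mem_add]
        tauto
      have hk2 := RKd_congr g k d _ _ x hiff hL
      have hx2 := RKd_to_walkA g (pvKeysFree g (PySem.Set.add (PySem.Set.add S low) u)) k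
        (PySem.Set.add (PySem.Set.add S low) u) d x le_rfl hk2
      exact (mem_walkListA g depsU _ [] x).mpr (Or.inr ⟨d, hd, hx2⟩)
    · right
      have hde : deps2 = depsL := by rw [hgl] at hg2; exact (Option.some.inj hg2).symm
      subst hde
      have hR4 : RKd g j d2 S x :=
        RKd_anti g j d2 S (PySem.Set.add S u) x
          (fun y hy => (PySem.Set.mem_add S u y).mpr (Or.inl hy)) hR2
      exact RKd_into_key g j S low deps2 d2 x hgl hl hd2 hR4

-- invariant of B's traversal: every already-visited CTE has all its leaves (w.r.t. the
-- current gray set S) in the accumulator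
def InvB (g : List (String × List String)) (v o S : List String) : Prop :=
  ∀ u ∈ v, u ∉ S → ∀ deps, (PySem.Dict.mk g).get? u = some deps →
    ∀ x, x ∈ walkListA g deps (PySem.Set.add S u) [] → x ∈ o

theorem update_chain (o w r : List String) :
    PySem.Set.update o (PySem.Set.update (PySem.Set.update [] w) r)
      = PySem.Set.update (PySem.Set.update o w) r := by
  rw [update_update, update_update]
  rfl

theorem simB (g : List (String × List String)) :
    ∀ (fuel : Nat) (v o S : List String) (n : String),
      pvKeysFree g v < fuel → (∀ s ∈ S, s ∈ v) → InvB g v o S →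
      ((visitB g fuel n v o).2 = PySem.Set.update o (walkA g n S)) ∧
      (∀ u ∈ v, u ∈ (visitB g fuel n v o).1) ∧
      InvB g (visitB g fuel n v o).1 (visitB g fuel n v o).2 S := by
  intro fuel
  induction fuel with
  | zero => intro v o S n hf; exact absurd hf (Nat.not_lt_zero _)
  | succ fuel ih =>
    intro v o S n hf hSv hInv
    cases hg : (PySem.Dict.mk g).get? (PySem.Str.lower n) with
    | none =>
      rw [show visitB g (fuel + 1) n v o = (v, PySem.Set.add o n) from by rw [visitB, hg]]
      refine ⟨?_, fun u hu => hu, ?_⟩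
      · rw [walkA_leaf g n S hg]; rfl
      · intro u hu hus deps hdeps x hx
        exact (PySem.Set.mem_add o n x).mpr (Or.inl (hInv u hu hus deps hdeps x hx))
    | some deps =>
      by_cases hv : PySem.Str.lower n ∈ v
      · rw [show visitB g (fuel + 1) n v o = (v, o) from by rw [visitB, hg]; simp [hv]]
        refine ⟨?_, fun u hu => hu, hInv⟩
        by_cases hs : PySem.Str.lower n ∈ S
        · rw [walkA_stack g n S deps hg hs]; rfl
        · rw [walkA_go g n S deps hg hs]
          exact (update_of_subset o _ (fun x hx => hInv _ hv hs deps hg x hx)).symm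
      · have hs : PySem.Str.lower n ∉ S := fun hc => hv (hSv _ hc)
        rw [show visitB g (fuel + 1) n v o
            = visitListB g fuel deps (PySem.Set.add v (PySem.Str.lower n)) o from by
          rw [visitB, hg]; simp [hv]]
        have hlist : ∀ (ds : List String) (v2 o2 : List String), pvKeysFree g v2 < fuel →
            (∀ s ∈ PySem.Set.add S (PySem.Str.lower n), s ∈ v2) →
            InvB g v2 o2 (PySem.Set.add S (PySem.Str.lower n)) →
            ((visitListB g fuel ds v2 o2).2
              = PySem.Set.update o2 (walkListA g ds (PySem.Set.add S (PySem.Str.lower n)) []))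
            ∧ (∀ u ∈ v2, u ∈ (visitListB g fuel ds v2 o2).1)
            ∧ InvB g (visitListB g fuel ds v2 o2).1 (visitListB g fuel ds v2 o2).2
                (PySem.Set.add S (PySem.Str.lower n)) := by
          intro ds
          induction ds with
          | nil =>
            intro v2 o2 _ _ hI
            rw [visitListB]
            exact ⟨by
                rw [show walkListA g ([] : List String)
                  (PySem.Set.add S (PySem.Str.lower n)) [] = [] from by rw [walkListA]]
                rfl,
              fun u hu => hu, hI⟩
          | cons d ds ihds =>
            intro v2 o2 hf2 hSv2 hI
            rw [show visitListB g fuel (d :: ds) v2 o2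
                = visitListB g fuel ds (visitB g fuel d v2 o2).1 (visitB g fuel d v2 o2).2 from by
              rw [visitListB]]
            obtain ⟨hA1, hA2, hA3⟩ := ih v2 o2 (PySem.Set.add S (PySem.Str.lower n)) d hf2 hSv2 hI
            obtain ⟨hB1, hB2, hB3⟩ := ihds (visitB g fuel d v2 o2).1 (visitB g fuel d v2 o2).2
              (lt_of_le_of_lt (pvKeysFree_anti g v2 _ hA2) hf2)
              (fun s hs2 => hA2 s (hSv2 s hs2)) hA3
            refine ⟨?_, fun u hu => hB2 _ (hA2 u hu), hB3⟩
            rw [hB1, hA1,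
              show walkListA g (d :: ds) (PySem.Set.add S (PySem.Str.lower n)) []
                = walkListA g ds (PySem.Set.add S (PySem.Str.lower n))
                    (PySem.Set.update [] (walkA g d (PySem.Set.add S (PySem.Str.lower n)))) from by
                rw [walkListA],
              walkListA_acc g ds (PySem.Set.add S (PySem.Str.lower n))
                (PySem.Set.update [] (walkA g d (PySem.Set.add S (PySem.Str.lower n)))),
              update_chain]
        have hfv : pvKeysFree g (PySem.Set.add v (PySem.Str.lower n)) < fuel := by
          have := pvKeysFree_add_lt g v _ deps hg hv
          omega
        have hSv2 : ∀ s ∈ PySem.Set.add S (PySem.Str.lower n),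
            s ∈ PySem.Set.add v (PySem.Str.lower n) := by
          intro s hs2
          rcases (PySem.Set.mem_add S (PySem.Str.lower n) s).mp hs2 with h2 | h2
          · exact (PySem.Set.mem_add v (PySem.Str.lower n) s).mpr (Or.inl (hSv s h2))
          · exact (PySem.Set.mem_add v (PySem.Str.lower n) s).mpr (Or.inr h2)
        have hIv2 : InvB g (PySem.Set.add v (PySem.Str.lower n)) o
            (PySem.Set.add S (PySem.Str.lower n)) := by
          intro u hu hus depsU hgu x hx
          rcases (PySem.Set.mem_add v (PySem.Str.lower n) u).mp hu with hu2 | hu2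
          · have husS : u ∉ S := fun hc =>
              hus ((PySem.Set.mem_add S (PySem.Str.lower n) u).mpr (Or.inl hc))
            exact hInv u hu2 husS depsU hgu x
              (walkKey_anti g S (PySem.Set.add S (PySem.Str.lower n)) u depsU x
                (fun y hy => (PySem.Set.mem_add S (PySem.Str.lower n) y).mpr (Or.inl hy)) hx)
          · exact absurd ((PySem.Set.mem_add S (PySem.Str.lower n) u).mpr (Or.inr hu2)) hus
        obtain ⟨h1, h2, h3⟩ := hlist deps (PySem.Set.add v (PySem.Str.lower n)) o hfv hSv2 hIv2
        have hcov : ∀ y, y ∈ walkListA g deps (PySem.Set.add S (PySem.Str.lower n)) [] →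
            y ∈ (visitListB g fuel deps (PySem.Set.add v (PySem.Str.lower n)) o).2 := by
          intro y hy
          rw [h1]
          exact (PySem.Set.mem_update o _ y).mpr (Or.inr hy)
        refine ⟨?_, ?_, ?_⟩
        · rw [h1, walkA_go g n S deps hg hs]
        · intro u hu
          exact h2 u ((PySem.Set.mem_add v (PySem.Str.lower n) u).mpr (Or.inl hu))
        · intro u hu hus depsU hgu x hx
          by_cases hul : u = PySem.Str.lower n
          · subst hul
            have hde : depsU = deps := by rw [hgu] at hg; exact Option.some.inj hg
            subst hde
            exact hcov x hx
          · rcases walkKey_split g S u (PySem.Str.lower n) depsU deps x hus hs hul hgu hg hx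
              with hL | hRt
            · refine h3 u hu ?_ depsU hgu x hL
              intro hc
              rcases (PySem.Set.mem_add S (PySem.Str.lower n) u).mp hc with h4 | h4
              · exact hus h4
              · exact hul h4
            · exact hcov x hRt

theorem simFold (g : List (String × List String)) :
    ∀ (refs : List String) (v o : List String), InvB g v o [] →
      (refs.foldl (fun st ref => visitB g (g.length + 1) ref st.1 st.2) (v, o)).2
        = refs.foldl (fun e r => PySem.Set.update e (walkA g r [])) o := by
  intro refs
  induction refs with
  | nil => intro v o _; rfl
  | cons r rs ih =>
    intro v o hI
    obtain ⟨h1, h2, h3⟩ := simB g (g.length + 1) v o [] r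
      (Nat.lt_succ_of_le (pvKeysFree_le_length g v)) (by simp) hI
    simp only [List.foldl_cons]
    have hrec := ih (visitB g (g.length + 1) r v o).1 (visitB g (g.length + 1) r v o).2 h3
    rw [← h1]
    exact hrec

-- ===== VERDICT (by name: the statement is the Claim_ definition above) =====
theorem expand_cte_references_py_spec : Claim_equal_expand_cte_references_py := by
  intro refs g _
  unfold Spec_expand_cte_references_py expand_cte_references_py expand_cte_references_py_alt
  exact (simFold g refs [] [] (by intro u hu; simp at hu)).symm
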